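-- pv_equiv track=rewrite | github.com/mchang62/Group02_P1 | src/radix_sort.py | get_max_digits
-- ===== SOURCE A (Python) =====
-- def get_max_digits(numbers):
--     """
--     Finds the maximum number of base-10 digits in the list.
--
--     Args:
--         numbers: List of integers
--
--     Returns:
--         Integer representing maximum digit count
--     """
--     if not numbers:
--         return 0
--
--     max_val = max(abs(num) for num in numbers)
--
--     if max_val == 0:
--         return 1
--
--     digit_count = 0
--     while max_val > 0:
--         digit_count += 1
--         max_val //= 10
--
--     return digit_count
-- ===== SOURCE B (Python) =====
-- def get_max_digits(numbers):
--     """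
--     Finds the maximum number of base-10 digits in the list.
--
--     Args:
--         numbers: List of integers
--
--     Returns:
--         Integer representing maximum digit count
--     """
--     if not numbers:
--         return 0
--     return max(len(str(abs(num))) for num in numbers)
-- ===== Notes on version B (the rewrite author's own statement) =====
-- stated objective: simpler
-- what changed: B maps each element to its own digit count (len(str(abs(n)))) and takes the maximum of those counts, replacing A's find-the-max-absolute-value pass followed by a separate floor-division digit-counting loop and its special zero branch.
import Mathlib
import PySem

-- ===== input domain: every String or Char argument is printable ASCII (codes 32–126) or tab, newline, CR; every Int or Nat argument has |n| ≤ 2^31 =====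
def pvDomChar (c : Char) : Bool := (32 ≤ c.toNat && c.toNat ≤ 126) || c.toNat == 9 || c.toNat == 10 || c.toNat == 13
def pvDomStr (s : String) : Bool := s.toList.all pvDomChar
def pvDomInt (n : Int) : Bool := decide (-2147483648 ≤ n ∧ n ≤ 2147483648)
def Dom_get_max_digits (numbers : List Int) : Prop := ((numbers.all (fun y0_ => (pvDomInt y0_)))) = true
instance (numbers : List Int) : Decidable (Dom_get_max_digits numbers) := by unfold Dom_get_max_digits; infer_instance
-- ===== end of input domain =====

-- B (simpler): maps each element to its own digit count len(str(abs(n))) and takes the max,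
-- instead of A's max-absolute-value pass followed by a separate floor-division digit-counting loop.


-- ===== PORT A =====
-- while-loop of A: digit_count += 1; max_val //= 10 while max_val > 0
def pvDigitLoop (max_val : Int) (digit_count : Int) : Int :=
  if max_val > 0 then pvDigitLoop (PySem.Int.floordiv max_val 10) (digit_count + 1)
  else digit_count
termination_by max_val.toNat
decreasing_by
  rw [PySem.Int.floordiv_eq_ediv_of_pos (by omega)]
  omega

def get_max_digits (numbers : List Int) : Int :=
  if numbers = [] then 0
  else
    match PySem.List.max? (numbers.map (fun num => |num|)) (fun y => y) with
    | none => 0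
    | some max_val => if max_val = 0 then 1 else pvDigitLoop max_val 0

-- ===== PORT B =====
def get_max_digits_alt (numbers : List Int) : Int :=
  if numbers = [] then 0
  else
    match PySem.List.max? (numbers.map (fun num => PySem.Str.len (PySem.Int.toStr |num|))) (fun y => y) with
    | none => 0
    | some m => m

-- ===== PRECONDITION & SPEC =====
def Spec_get_max_digits (numbers : List Int) (out : Int) : Prop := out = get_max_digits_alt numbers
instance (numbers : List Int) (out : Int) : Decidable (Spec_get_max_digits numbers out) := by unfold Spec_get_max_digits; infer_instance

-- ===== CLAIM (what is proved, stated in full; the proofs are below) =====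
def Claim_equal_get_max_digits : Prop := ∀ (numbers : List Int), Dom_get_max_digits numbers → Spec_get_max_digits numbers (get_max_digits numbers)

-- ===== LEMMAS AND PROOFS =====

-- digit length of a nonnegative integer, as printed in base 10
def pvL (a : Int) : Int := ((Nat.toDigits 10 a.toNat).length : Int)

lemma pvL_mono {a b : Int} (_ha : 0 ≤ a) (hab : a ≤ b) : pvL a ≤ pvL b := by
  unfold pvL
  have hk : 0 < (Nat.toDigits 10 b.toNat).length := Nat.length_toDigits_pos
  have hb : b.toNat < 10 ^ (Nat.toDigits 10 b.toNat).length :=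
    (Nat.length_toDigits_le_iff (by norm_num) hk).mp le_rfl
  have ha' : (Nat.toDigits 10 a.toNat).length ≤ (Nat.toDigits 10 b.toNat).length :=
    (Nat.length_toDigits_le_iff (by norm_num) hk).mpr (lt_of_le_of_lt (by omega) hb)
  exact_mod_cast ha'

lemma pvL_max {a b : Int} (ha : 0 ≤ a) (hb : 0 ≤ b) :
    pvL (max a b) = max (pvL a) (pvL b) := by
  rcases le_total a b with h | h
  · rw [max_eq_right h, max_eq_right (pvL_mono ha h)]
  · rw [max_eq_left h, max_eq_left (pvL_mono hb h)]

lemma pvDl (a : Int) (ha : 0 ≤ a) : PySem.Str.len (PySem.Int.toStr a) = pvL a := by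
  simp [PySem.Str.len, PySem.Int.toStr, PySem.Int.toChars, pvL, not_lt.mpr ha]

lemma pvDigitLoop_eq (m : Int) (hm : 0 < m) : ∀ c : Int, pvDigitLoop m c = c + pvL m := by
  have H : ∀ k : Nat, ∀ m : Int, m.toNat ≤ k → 0 < m → ∀ c : Int, pvDigitLoop m c = c + pvL m := by
    intro k
    induction k with
    | zero => intro m hk hm; omega
    | succ k ih =>
      intro m hk hm c
      rw [pvDigitLoop, if_pos hm, PySem.Int.floordiv_eq_ediv_of_pos (by omega)]
      by_cases hpos : 0 < m / 10
      · have hL : pvL m = pvL (m / 10) + 1 := by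
          have h10 : ¬ m.toNat < 10 := by omega
          have hdn : (m / 10).toNat = m.toNat / 10 := by omega
          unfold pvL
          rw [Nat.toDigits_eq_if (show (1:Nat) < 10 by norm_num), if_neg h10, hdn]
          simp only [List.length_append, List.length_cons, List.length_nil]
          push_cast
          ring
        rw [ih (m / 10) (by omega) hpos, hL]
        ring
      · have hz : m / 10 = 0 := by omega
        have h10 : m.toNat < 10 := by omega
        rw [hz, pvDigitLoop, if_neg (by norm_num)]
        unfold pvL
        rw [Nat.toDigits_eq_if (show (1:Nat) < 10 by norm_num), if_pos h10]
        simp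
  exact H m.toNat m le_rfl hm

lemma pvFoldMap (t : List Int) : ∀ a : Int, 0 ≤ a →
    (t.map (fun num => PySem.Str.len (PySem.Int.toStr |num|))).foldl max (pvL a)
      = pvL ((t.map (fun num => |num|)).foldl max a) := by
  induction t with
  | nil => intro a _; rfl
  | cons y t ih =>
    intro a ha
    simp only [List.map_cons, List.foldl_cons]
    rw [pvDl |y| (abs_nonneg y), ← pvL_max ha (abs_nonneg y)]
    exact ih (max a |y|) (le_trans ha (le_max_left _ _))

-- ===== VERDICT (by name: the statement is the Claim_ definition above) =====
theorem get_max_digits_spec : Claim_equal_get_max_digits := by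
  intro numbers _
  unfold Spec_get_max_digits get_max_digits get_max_digits_alt
  cases numbers with
  | nil => rfl
  | cons x t =>
    simp only [if_neg (List.cons_ne_nil x t), List.map_cons]
    rw [PySem.List.max?_id_cons, PySem.List.max?_id_cons]
    have hx : (0:Int) ≤ |x| := abs_nonneg x
    have hM : |x| ≤ (t.map (fun num => |num|)).foldl max |x| :=
      (PySem.List.le_foldl_max (t.map (fun num => |num|)) |x|).1
    rw [pvDl |x| hx, pvFoldMap t |x| hx]
    set M := (t.map (fun num => |num|)).foldl max |x| with hMdef
    show (if M = 0 then 1 else pvDigitLoop M 0) = pvL M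
    by_cases h0 : M = 0
    · rw [if_pos h0, h0]
      rfl
    · rw [if_neg h0, pvDigitLoop_eq M (by omega) 0, zero_add]
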